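-- pv_equiv track=rewrite | github.com/inkz17/ango_app | app.py | read_ango
-- ===== SOURCE A (Python) =====
-- def read_ango(text, num_chars):
--     col = len(text) // num_chars
--     result = ""
--     for j in range(num_chars):
--         for i in range(col):
--             result += text[num_chars * i + j]
--         result += "\n"
--
--
--     return result
-- ===== SOURCE B (Python) =====
-- def read_ango(text, num_chars):
--     col = len(text) // num_chars
--     cols = {}
--     for p, ch in enumerate(text[:num_chars * col]):
--         cols.setdefault(p % num_chars, []).append(ch)
--     return ''.join(''.join(cols.get(j, [])) + '\n' for j in range(num_chars))
-- ===== Notes on version B (the rewrite author's own statement) =====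
-- stated objective: alternative
-- what changed: B replaces A's column-major nested loops with flat index arithmetic by a single row-major pass that tags each character of the truncated text with its column index p % num_chars, groups the tagged characters into a dict of per-column lists, and finally joins each column's list plus a newline.
import Mathlib
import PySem

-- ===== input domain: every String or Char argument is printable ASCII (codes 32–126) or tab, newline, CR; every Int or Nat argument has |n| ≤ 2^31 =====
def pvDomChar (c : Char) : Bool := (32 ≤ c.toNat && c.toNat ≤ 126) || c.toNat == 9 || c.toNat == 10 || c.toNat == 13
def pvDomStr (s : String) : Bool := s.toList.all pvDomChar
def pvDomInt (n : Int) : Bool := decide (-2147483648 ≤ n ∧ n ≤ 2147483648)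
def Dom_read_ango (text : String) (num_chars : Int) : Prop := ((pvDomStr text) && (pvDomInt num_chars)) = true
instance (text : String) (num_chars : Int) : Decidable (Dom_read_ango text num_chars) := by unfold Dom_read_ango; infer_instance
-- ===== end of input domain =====

-- B replaces A's column-major nested-loop indexing by one row-major pass that tags each
-- character with its column index p % num_chars and groups them in a dict; objective: alternative.


-- ===== PORT A =====
-- A: result accumulated character by character, flat index text[num_chars*i + j].
-- The index is always in range under Pre_ (proved below), so the total pyGetD form is exact.
def read_ango (text : String) (num_chars : Int) : String :=
  let cs := text.toList
  let col := PySem.Int.floordiv (cs.length : Int) num_chars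
  let result := (PySem.List.pyRange 0 num_chars 1).foldl (fun res j =>
      ((PySem.List.pyRange 0 col 1).foldl (fun res i =>
          res ++ [PySem.List.pyGetD cs (num_chars * i + j) ' ']) res) ++ ['\n']) ([] : List Char)
  String.ofList result

-- ===== PORT B =====
-- B: one pass over text[:num_chars*col] tagging position p with key p % num_chars, grouped
-- into a dict of per-column lists; Python's cols.setdefault(k, []).append(ch) mutates the
-- stored list in place, i.e. exactly Dict.modify k [] (· ++ [ch]); then join column j + '\n'
-- for j in range(num_chars), with cols.get(j, []) = Dict.getD.
def read_ango_alt (text : String) (num_chars : Int) : String :=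
  let cs := text.toList
  let col := PySem.Int.floordiv (cs.length : Int) num_chars
  let cols := (PySem.List.enumerate (PySem.List.slice cs none (some (num_chars * col))) 0).foldl
      (fun d q => d.modify (PySem.Int.mod q.1 num_chars) ([] : List Char) (· ++ [q.2]))
      (PySem.Dict.empty : PySem.Dict Int (List Char))
  String.ofList (((PySem.List.pyRange 0 num_chars 1).map
      (fun j => cols.getD j [] ++ ['\n'])).flatten)

-- ===== PRECONDITION & SPEC =====
-- Pre_ excludes only num_chars = 0, where Python A (and B) raise ZeroDivisionError.
def Pre_read_ango (text : String) (num_chars : Int) : Prop := num_chars ≠ 0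
instance (text : String) (num_chars : Int) : Decidable (Pre_read_ango text num_chars) := by unfold Pre_read_ango; infer_instance
def pvWitness_read_ango : String × Int := ("abcdef", 2)
def Spec_read_ango (text : String) (num_chars : Int) (out : String) : Prop := out = read_ango_alt text num_chars
instance (text : String) (num_chars : Int) (out : String) : Decidable (Spec_read_ango text num_chars out) := by unfold Spec_read_ango; infer_instance

-- ===== CLAIM (what is proved, stated in full; the proofs are below) =====
def Claim_equal_read_ango : Prop := ∀ (text : String) (num_chars : Int), Dom_read_ango text num_chars → Pre_read_ango text num_chars → Spec_read_ango text num_chars (read_ango text num_chars)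

-- ===== LEMMAS AND PROOFS =====

-- filtering List.range for one value
lemma range_filter_eq (N J : Nat) :
    (List.range N).filter (fun k => k == J) = if J < N then [J] else [] := by
  induction N with
  | zero => simp
  | succ N ih =>
      rw [List.range_succ, List.filter_append, ih]
      by_cases h1 : J < N
      · have : J < N + 1 := by omega
        simp [h1, this, Nat.ne_of_gt h1]
      · by_cases h2 : N = J
        · subst h2; simp
        · have : ¬ J < N + 1 := by omega
          simp [h1, h2, this]

-- the positions of column J inside range(0, C*N)
lemma filter_pyRange_mod (N C J : Nat) (hJ : J < N) :
    (PySem.List.pyRange 0 ((C * N : Nat) : Int) 1).filter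
        (fun p => PySem.Int.mod p (N : Int) == (J : Int))
      = (List.range C).map (fun i => ((i * N + J : Nat) : Int)) := by
  induction C with
  | zero => simp [PySem.List.pyRange_one_eq_nil]
  | succ C ih =>
      have hsplit : PySem.List.pyRange 0 (((C + 1) * N : Nat) : Int) 1
          = PySem.List.pyRange 0 ((C * N : Nat) : Int) 1
            ++ PySem.List.pyRange ((C * N : Nat) : Int) (((C + 1) * N : Nat) : Int) 1 := by
        apply PySem.List.pyRange_one_append
        · exact_mod_cast Nat.zero_le _
        · exact_mod_cast Nat.mul_le_mul_right N (Nat.le_succ C)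
      rw [hsplit, List.filter_append, ih]
      have hblock : PySem.List.pyRange ((C * N : Nat) : Int) (((C + 1) * N : Nat) : Int) 1
          = (List.range N).map (fun k => ((C * N + k : Nat) : Int)) := by
        rw [PySem.List.pyRange_one]
        have h1 : ((((C + 1) * N : Nat) : Int) - ((C * N : Nat) : Int)).toNat = N := by
          have : (C + 1) * N = C * N + N := by ring
          omega
        rw [h1]
        apply List.map_congr_left
        intro k _
        push_cast
        ring
      rw [hblock, List.filter_map]
      have hfil : (List.range N).filter
          ((fun p => PySem.Int.mod p (N : Int) == (J : Int)) ∘ (fun k => ((C * N + k : Nat) : Int)))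
            = (List.range N).filter (fun k => k == J) := by
        apply List.filter_congr
        intro k hk
        rw [List.mem_range] at hk
        simp only [Function.comp]
        rw [PySem.Int.mod_natCast]
        have hmod : (C * N + k) % N = k := by
          rw [Nat.add_comm, Nat.add_mul_mod_self_right]
          exact Nat.mod_eq_of_lt hk
        rw [hmod]
        simp
      rw [hfil, range_filter_eq N J, if_pos hJ, List.range_succ, List.map_append]
      simp
  
-- main column characterisation
lemma col_getD (cs : List Char) (N C J : Nat) (hJ : J < N) (hNC : N * C ≤ cs.length) :
    (((PySem.List.enumerate (PySem.List.slice cs none (some (((N : Int)) * (C : Int)))) 0).foldl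
        (fun d q => d.modify (PySem.Int.mod q.1 (N : Int)) ([] : List Char) (· ++ [q.2]))
        (PySem.Dict.empty : PySem.Dict Int (List Char))).getD (J : Int) [])
      = (List.range C).map (fun i => cs.getD (N * i + J) ' ') := by
  have hcast : ((N : Int) * (C : Int)) = ((N * C : Nat) : Int) := by push_cast; ring
  rw [hcast, PySem.List.slice_to_natCast]
  set t := cs.take (N * C) with ht
  have htlen : t.length = N * C := by
    rw [ht, List.length_take]; omega
  rw [PySem.List.enumerate_eq_map_pyRange t ' ']
  have hswap : List.foldl (fun (d : PySem.Dict Int (List Char)) q =>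
        d.modify (PySem.Int.mod q.1 (N : Int)) [] (fun x => x ++ [q.2])) PySem.Dict.empty
        ((PySem.List.pyRange 0 (PySem.List.len t)).map (fun j => (j, PySem.List.pyGetD t j ' ')))
      = List.foldl (fun (d : PySem.Dict Int (List Char)) p =>
        d.modify p.1 [] (fun x => x ++ [p.2])) PySem.Dict.empty
        ((PySem.List.pyRange 0 (PySem.List.len t)).map
          (fun j => (PySem.Int.mod j (N : Int), PySem.List.pyGetD t j ' '))) := by
    rw [List.foldl_map, List.foldl_map]
  rw [hswap, PySem.Dict.getD_foldl_modify_append, List.filter_map]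
  have hlen2 : PySem.List.len t = ((N * C : Nat) : Int) := by
    simp [PySem.List.len_eq, htlen]
  have hpred : ((fun p => p.1 == (J : Int)) ∘
        fun j => (PySem.Int.mod j (N : Int), PySem.List.pyGetD t j ' '))
      = (fun p => PySem.Int.mod p (N : Int) == (J : Int)) := rfl
  rw [hlen2, Nat.mul_comm N C, hpred, filter_pyRange_mod N C J hJ, List.map_map, List.map_map]
  simp only [PySem.Dict.getD_empty, List.nil_append]
  apply List.map_congr_left
  intro i hi
  rw [List.mem_range] at hi
  simp only [Function.comp]
  rw [PySem.List.pyGetD_natCast]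
  have hlt : i * N + J < N * C := by
    have h2 : i * N + N ≤ N * C := by nlinarith
    omega
  have hlt' : N * i + J < N * C := by rw [Nat.mul_comm N i]; exact hlt
  rw [List.getD_eq_getElem _ _ (by rw [htlen]; omega : i * N + J < t.length),
      List.getD_eq_getElem _ _ (by omega : N * i + J < cs.length)]
  have hidx : i * N + J = N * i + J := by ring
  simp only [ht, List.getElem_take, hidx]

-- ===== VERDICT (by name: the statement is the Claim_ definition above) =====
theorem read_ango_spec : Claim_equal_read_ango := by
  intro text n _ hpre
  unfold Spec_read_ango read_ango read_ango_alt
  simp only []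
  rcases lt_trichotomy n 0 with hn | hn | hn
  · rw [PySem.List.pyRange_one_eq_nil (by omega : n ≤ 0)]
    simp
  · exact absurd hn hpre
  · obtain ⟨N, rfl⟩ := Int.eq_ofNat_of_zero_le hn.le
    have hN : 0 < N := by exact_mod_cast hn
    set cs := text.toList with hcs
    set C := cs.length / N with hC
    have hcol : PySem.Int.floordiv (cs.length : Int) ((N : Nat) : Int) = ((C : Nat) : Int) := by
      rw [PySem.Int.floordiv_natCast]
    have hNC : N * C ≤ cs.length := by
      have := Nat.div_mul_le_self cs.length N
      rw [hC, Nat.mul_comm]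
      exact this
    rw [hcol]
    congr 1
    simp only [PySem.List.foldl_append_singleton_eq_map, List.append_assoc]
    rw [PySem.List.foldl_append_eq_flatMap, List.nil_append, ← List.flatMap_def]
    apply List.flatMap_congr
    intro j hj
    rw [PySem.List.mem_pyRange_one] at hj
    obtain ⟨J, rfl⟩ := Int.eq_ofNat_of_zero_le hj.1
    have hJ : J < N := by exact_mod_cast hj.2
    congr 1
    rw [col_getD cs N C J hJ hNC, PySem.List.pyRange_zero_nat, List.map_map]
    apply List.map_congr_left
    intro i hi
    simp only [Function.comp]
    have hcast : ((N : Nat) : Int) * ((i : Nat) : Int) + ((J : Nat) : Int)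
        = ((N * i + J : Nat) : Int) := by push_cast; ring
    rw [hcast, PySem.List.pyGetD_natCast]
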